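-- pv_equiv track=rewrite | github.com/anagilda/advent-of-code | 2019/day-04/solution.py | exists_window_of_repeated_digits
-- ===== SOURCE A (Python) =====
-- def window_of_adjacent_digits(iterable_number: str, window_size: int):
--     return [iterable_number[index:index + window_size] for index in range(len(iterable_number) - (window_size - 1))]
--
-- def only_repeated_digits(iterable_number: str) -> bool:
--     return all(digit == iterable_number[0] for digit in iterable_number)
--
-- def exists_window_of_repeated_digits(iterable_number: str, window_size: int, strict_repeat: bool = False) -> bool:
--     possible_repeated_digits = window_of_adjacent_digits(iterable_number=iterable_number, window_size=window_size)
--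
--     if not strict_repeat:
--         are_repeated_digits = (only_repeated_digits(iterable_number=number) for number in possible_repeated_digits)
--
--         return any(are_repeated_digits)
--
--     else:
--         for index in range(len(possible_repeated_digits)):
--             window = possible_repeated_digits[index]
--             if only_repeated_digits(iterable_number=window):
--                 flag = True
--
--                 if index > 0:
--                     if window[0] == possible_repeated_digits[index - 1][0]:
--                         flag = False
--
--                 if index < len(possible_repeated_digits) - 1:
--                     if window[0] == possible_repeated_digits[index + 1][-1]:
--                         flag = False
--
--                 if flag:
--                     return True
--
--         return False
-- ===== SOURCE B (Python) =====
-- def exists_window_of_repeated_digits(iterable_number: str, window_size: int, strict_repeat: bool = False) -> bool: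
--     # Single pass maintaining the current run of equal characters: a window of
--     # repeated digits of window_size exists iff some maximal run has length
--     # >= window_size (non-strict) or exactly window_size (strict).
--     run, prev = 0, None
--     for ch in iterable_number:
--         if run > 0 and ch == prev:
--             run += 1
--             continue
--         if run > 0 and ((run == window_size) if strict_repeat else (run >= window_size)):
--             return True
--         run, prev = 1, ch
--     return run > 0 and ((run == window_size) if strict_repeat else (run >= window_size))
-- ===== Notes on version B (the rewrite author's own statement) =====
-- stated objective: faster
-- what changed: A materialises every length-w window (slicing) and scans each window for equal digits, plus neighbour-window lookups in the strict case; B is a single pass that maintains the current run of equal characters and tests each maximal run length (>= w, or == w when strict).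
-- outside the precondition, e.g. on exists_window_of_repeated_digits('', 0, False): A returns True, B returns False; on exists_window_of_repeated_digits('', 0, True): A returns True, B returns False
import Mathlib
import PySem

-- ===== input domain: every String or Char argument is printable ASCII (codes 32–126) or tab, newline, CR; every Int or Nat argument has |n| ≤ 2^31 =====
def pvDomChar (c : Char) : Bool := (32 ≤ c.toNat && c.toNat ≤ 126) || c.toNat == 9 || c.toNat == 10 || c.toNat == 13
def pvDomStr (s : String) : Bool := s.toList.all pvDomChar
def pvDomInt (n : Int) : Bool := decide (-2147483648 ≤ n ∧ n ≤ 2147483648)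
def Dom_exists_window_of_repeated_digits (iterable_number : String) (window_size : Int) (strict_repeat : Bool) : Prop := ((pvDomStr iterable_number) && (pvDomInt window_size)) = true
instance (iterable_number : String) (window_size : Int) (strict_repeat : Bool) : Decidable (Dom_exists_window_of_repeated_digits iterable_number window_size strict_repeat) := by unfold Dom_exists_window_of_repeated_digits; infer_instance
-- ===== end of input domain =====

-- B replaces A's window-materialising O(n·w) scan by a single run-length pass; objective: faster (asymptotic O(n)).

-- ===== PORT A =====
-- only_repeated_digits: Python's generator never evaluates s[0] on an empty s (all([]) is True)
def pvAllRep (number : List Char) : Bool :=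
  number.all (fun d => PySem.List.pyGet? number 0 == some d)

-- window_of_adjacent_digits
def pvWindows (s : List Char) (ws : Int) : List (List Char) :=
  (PySem.List.pyRange 0 ((s.length : Int) - (ws - 1)) 1).map
    (fun i => PySem.List.slice s (some i) (some (i + ws)))

-- A's strict 'for index in range(len(...))' loop with early return.
-- Where Python raises IndexError (window[0] of an empty window, only reachable for
-- window_size ≤ 0, outside Pre_), pyGet? is none and getD supplies a dummy.
def pvStrictLoop (wins : List (List Char)) : List Int → Bool
  | [] => false
  | index :: rest =>
      let window := (PySem.List.pyGet? wins index).getD []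
      if pvAllRep window then
        let flag := true
        let flag := if 0 < index then
            (if PySem.List.pyGet? window 0 == PySem.List.pyGet? ((PySem.List.pyGet? wins (index - 1)).getD []) 0 then false else flag)
          else flag
        let flag := if index < (wins.length : Int) - 1 then
            (if PySem.List.pyGet? window 0 == PySem.List.pyGet? ((PySem.List.pyGet? wins (index + 1)).getD []) (-1) then false else flag)
          else flag
        if flag then true else pvStrictLoop wins rest
      else pvStrictLoop wins rest

def exists_window_of_repeated_digits (iterable_number : String) (window_size : Int) (strict_repeat : Bool) : Bool :=
  let wins := pvWindows iterable_number.toList window_size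
  if !strict_repeat then
    wins.any (fun number => pvAllRep number)
  else
    pvStrictLoop wins (PySem.List.pyRange 0 (wins.length : Int) 1)

-- ===== PORT B =====
-- Source B's single for-loop: state (run, prev) = length and character of the current run
def pvRunLoop (window_size : Int) (strict_repeat : Bool) (run : Int) (prev : Option Char) : List Char → Bool
  | [] => decide (0 < run) && (if strict_repeat then run == window_size else decide (window_size ≤ run))
  | ch :: rest =>
      if decide (0 < run) && (some ch == prev) then
        pvRunLoop window_size strict_repeat (run + 1) prev rest
      else if decide (0 < run) && (if strict_repeat then run == window_size else decide (window_size ≤ run)) then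
        true
      else
        pvRunLoop window_size strict_repeat 1 (some ch) rest

def exists_window_of_repeated_digits_alt (iterable_number : String) (window_size : Int) (strict_repeat : Bool) : Bool :=
  pvRunLoop window_size strict_repeat 0 none iterable_number.toList

-- ===== PRECONDITION & SPEC =====
-- Pre_ excludes window_size ≤ 0 in the strict case (A raises IndexError on window[0] of an
-- empty slice window on all but the empty-input corner, where its True comes from that same
-- empty window) and on the empty string (non-strict A's True also comes from an empty slice
-- window, an artefact of slicing that B's run scan has no reason to mimic).
def Pre_exists_window_of_repeated_digits (iterable_number : String) (window_size : Int) (strict_repeat : Bool) : Prop :=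
  1 ≤ window_size ∨ (strict_repeat = false ∧ iterable_number ≠ "")
instance (iterable_number : String) (window_size : Int) (strict_repeat : Bool) : Decidable (Pre_exists_window_of_repeated_digits iterable_number window_size strict_repeat) := by unfold Pre_exists_window_of_repeated_digits; infer_instance

def pvWitness_exists_window_of_repeated_digits : String × Int × Bool := ("122456", 2, false)

def Spec_exists_window_of_repeated_digits (iterable_number : String) (window_size : Int) (strict_repeat : Bool) (out : Bool) : Prop := out = exists_window_of_repeated_digits_alt iterable_number window_size strict_repeat
instance (iterable_number : String) (window_size : Int) (strict_repeat : Bool) (out : Bool) : Decidable (Spec_exists_window_of_repeated_digits iterable_number window_size strict_repeat out) := by unfold Spec_exists_window_of_repeated_digits; infer_instance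

-- ===== CLAIM (what is proved, stated in full; the proofs are below) =====
def Claim_equal_exists_window_of_repeated_digits : Prop := ∀ (iterable_number : String) (window_size : Int) (strict_repeat : Bool), Dom_exists_window_of_repeated_digits iterable_number window_size strict_repeat → Pre_exists_window_of_repeated_digits iterable_number window_size strict_repeat → Spec_exists_window_of_repeated_digits iterable_number window_size strict_repeat (exists_window_of_repeated_digits iterable_number window_size strict_repeat)


-- ===== LEMMAS AND PROOFS =====

def pvAddRun (c : Char) (k : Nat) : List (Char × Nat) → List (Char × Nat)
  | (d, m) :: more => if c = d then (c, k + m) :: more else (c, k) :: (d, m) :: more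
  | [] => [(c, k)]
def pvRuns : List Char → List (Char × Nat)
  | [] => []
  | c :: rest => pvAddRun c 1 (pvRuns rest)
def pvTest (w : Nat) (strict : Bool) (r : Nat) : Bool :=
  if strict then r == w else decide (w ≤ r)
def pvAnyRun (w : Nat) (strict : Bool) (runs : List (Char × Nat)) : Bool :=
  runs.any (fun p => pvTest w strict p.2)
theorem pvAddRun_addRun (c : Char) (k : Nat) (rs : List (Char × Nat)) :
    pvAddRun c k (pvAddRun c 1 rs) = pvAddRun c (k + 1) rs := by
  match rs with
  | [] => simp [pvAddRun]
  | (d, m) :: more =>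
    by_cases h : c = d <;> simp [pvAddRun, h, Nat.add_comm, Nat.add_assoc, Nat.add_left_comm]

theorem pvAddRun_ne (c : Char) (k : Nat) (x : Char) (rs : List Char) (h : c ≠ x) :
    pvAddRun c k (pvRuns (x :: rs)) = (c, k) :: pvRuns (x :: rs) := by
  show pvAddRun c k (pvAddRun x 1 (pvRuns rs)) = (c, k) :: pvAddRun x 1 (pvRuns rs)
  cases hrs : pvRuns rs with
  | nil => simp [pvAddRun, h]
  | cons p more =>
    obtain ⟨d, m⟩ := p
    by_cases hxd : x = d <;> simp [pvAddRun, hxd, h] <;> simp_all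

theorem pvTest_int (w : Nat) (strict : Bool) (k : Nat) :
    (if strict then (k : Int) == (w : Int) else decide ((w : Int) ≤ (k : Int))) = pvTest w strict k := by
  cases strict <;> simp [pvTest]

theorem pvRunLoop_gen (w : Nat) (strict : Bool) :
    ∀ (rest : List Char) (c : Char) (k : Nat), 1 ≤ k →
      pvRunLoop (w : Int) strict (k : Int) (some c) rest = pvAnyRun w strict (pvAddRun c k (pvRuns rest)) := by
  intro rest
  induction rest with
  | nil =>
    intro c k hk
    have hk' : decide ((0:Int) < (k:Int)) = true := by simp; exact_mod_cast hk
    rw [pvRunLoop, hk']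
    simp only [Bool.true_and, pvTest_int]
    simp [pvAnyRun, pvAddRun, pvRuns]
  | cons ch rs ih =>
    intro c k hk
    by_cases hc : ch = c
    · subst hc
      rw [pvRunLoop]
      simp only [show (0:Int) < k by exact_mod_cast hk, decide_true, beq_self_eq_true, Bool.and_self, if_true]
      have := ih ch (k + 1) (by omega)
      push_cast at this
      rw [this]
      show _ = pvAnyRun w strict (pvAddRun ch k (pvAddRun ch 1 (pvRuns rs)))
      rw [pvAddRun_addRun]
    · rw [pvRunLoop]
      have hk' : decide ((0:Int) < (k:Int)) = true := by simp; exact_mod_cast hk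
      have hne : (some ch == some c) = false := by simp [hc]
      rw [hne, hk']
      simp only [Bool.true_and, Bool.and_false, if_false, pvTest_int]
      rw [pvAddRun_ne c k ch rs (Ne.symm hc)]
      show _ = pvAnyRun w strict ((c, k) :: pvRuns (ch :: rs))
      simp only [pvAnyRun, List.any_cons]
      have h1 := ih ch 1 (le_refl 1)
      norm_num at h1
      by_cases ht : pvTest w strict k = true
      · simp [ht]
      · simp only [Bool.false_eq_true, if_false, ht, Bool.false_or]
        rw [h1]
        rfl

theorem pvB_runs (l : List Char) (w : Nat) (strict : Bool) :
    pvRunLoop (w : Int) strict 0 none l = pvAnyRun w strict (pvRuns l) := by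
  cases l with
  | nil => simp [pvRunLoop, pvAnyRun, pvRuns]
  | cons c rest =>
    rw [pvRunLoop]
    norm_num
    have := pvRunLoop_gen w strict rest c 1 (le_refl 1)
    norm_num at this
    rw [this]
    rfl

def pvMidNon (l : List Char) (w : Nat) : Bool :=
  (List.range (l.length + 1 - w)).any (fun j => pvAllRep ((l.drop j).take w))

theorem pvAllRep_iff (u : List Char) : pvAllRep u = true ↔ ∀ x ∈ u, u[0]? = some x := by
  cases u with
  | nil => simp [pvAllRep]
  | cons a t => simp [pvAllRep, PySem.List.pyGet?, PySem.List.pyIdx?]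

theorem pvAllRep_replicate (w : Nat) (c : Char) : pvAllRep (List.replicate w c) = true := by
  rw [pvAllRep_iff]
  intro x hx
  have hx' := List.eq_of_mem_replicate hx
  subst hx'
  have hw : 0 < w := by
    rcases Nat.eq_zero_or_pos w with h | h
    · subst h; simp at hx
    · exact h
  simp [List.getElem?_replicate, hw]

theorem pvDropAppend (r j : Nat) (c : Char) (d : List Char) (h : r ≤ j) :
    (List.replicate r c ++ d).drop j = d.drop (j - r) := by
  rw [List.drop_append]
  simp [List.drop_replicate, show r - j = 0 from by omega]

theorem pvGetL (r : Nat) (c : Char) (d : List Char) (i : Nat) (h : i < r) :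
    (List.replicate r c ++ d)[i]? = some c := by
  rw [List.getElem?_append_left (by simpa using h)]
  simp [List.getElem?_replicate, h]

theorem pvGetR (r : Nat) (c : Char) (d : List Char) (k : Nat) :
    (List.replicate r c ++ d)[r + k]? = d[k]? := by
  rw [List.getElem?_append_right (by simp)]
  simp

theorem pvWin0 (l : List Char) (j w : Nat) (hw : 1 ≤ w) :
    ((l.drop j).take w)[0]? = l[j]? := by
  rw [List.getElem?_take, if_pos (show 0 < w by omega)]
  simp [List.getElem?_drop]

theorem core_non (c : Char) (d : List Char) (r w : Nat) (hr : 1 ≤ r) (hw : 1 ≤ w)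
    (hd : d.head? ≠ some c) :
    pvMidNon (List.replicate r c ++ d) w = (decide (w ≤ r) || pvMidNon d w) := by
  rw [Bool.eq_iff_iff]
  simp only [pvMidNon, List.any_eq_true, List.mem_range, List.length_append,
    List.length_replicate, Bool.or_eq_true, decide_eq_true_eq]
  constructor
  · rintro ⟨j, hj, hrep⟩
    by_cases h1 : j + w ≤ r
    · left; omega
    · by_cases h2 : r ≤ j
      · right
        refine ⟨j - r, by omega, ?_⟩
        rwa [pvDropAppend r j c d h2] at hrep
      · exfalso
        have hjr : j < r := by omega
        have hdlen : 1 ≤ d.length := by omega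
        obtain ⟨e, d', rfl⟩ : ∃ e d', d = e :: d' := by
          cases d with
          | nil => simp at hdlen
          | cons e d' => exact ⟨e, d', rfl⟩
        set l := List.replicate r c ++ (e :: d') with hl
        set win := (l.drop j).take w with hwin
        have hc0 : win[0]? = some c := by
          rw [hwin, pvWin0 l j w hw, pvGetL r c _ j hjr]
        have he : win[r - j]? = some e := by
          rw [hwin, List.getElem?_take]
          simp only [show r - j < w from by omega, if_true, List.getElem?_drop]
          rw [show j + (r - j) = r + 0 from by omega, pvGetR]
          simp
        rw [pvAllRep_iff] at hrep
        have h1 := hrep c (List.mem_of_getElem? hc0)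
        have h2 := hrep e (List.mem_of_getElem? he)
        rw [h1] at h2
        simp_all
  · rintro (hwr | ⟨j, hj, hrep⟩)
    · refine ⟨0, by omega, ?_⟩
      rw [List.drop_zero, List.take_append_of_le_length (by simpa using hwr), List.take_replicate,
        show min w r = w from by omega]
      exact pvAllRep_replicate w c
    · refine ⟨r + j, by omega, ?_⟩
      rw [pvDropAppend r (r + j) c d (by omega), show r + j - r = j from by omega]
      exact hrep

def pvMidStrict (l : List Char) (w : Nat) : Bool :=
  (List.range (l.length + 1 - w)).any (fun j =>
    pvAllRep ((l.drop j).take w) &&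
    (decide (j = 0) || !(l[j]? == l[j-1]?)) &&
    (decide (j = l.length - w) || !(l[j]? == l[j+w]?)))

theorem core_strict (c : Char) (d : List Char) (r w : Nat) (hr : 1 ≤ r) (hw : 1 ≤ w)
    (hd : d.head? ≠ some c) :
    pvMidStrict (List.replicate r c ++ d) w = (decide (r = w) || pvMidStrict d w) := by
  rw [Bool.eq_iff_iff]
  simp only [pvMidStrict, List.any_eq_true, List.mem_range, List.length_append,
    List.length_replicate, Bool.or_eq_true, Bool.and_eq_true, decide_eq_true_eq,
    Bool.not_eq_true', beq_eq_false_iff_ne, ne_eq]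
  constructor
  · rintro ⟨j, hj, ⟨hrep, hL⟩, hR⟩
    by_cases h2 : r ≤ j
    · right
      refine ⟨j - r, by omega, ⟨?_, ?_⟩, ?_⟩
      · rwa [pvDropAppend r j c d h2] at hrep
      · by_cases hj0 : j - r = 0
        · exact Or.inl hj0
        · refine Or.inr ?_
          rcases hL with h | h
          · omega
          · intro heq
            apply h
            rw [show j = r + (j - r) from by omega, pvGetR,
              show r + (j - r) - 1 = r + (j - r - 1) from by omega, pvGetR]
            exact heq
      · rcases hR with h | h
        · exact Or.inl (by omega)
        · refine Or.inr ?_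
          intro heq
          apply h
          rw [show j = r + (j - r) from by omega, pvGetR,
            show r + (j - r) + w = r + (j - r + w) from by omega, pvGetR]
          exact heq
    · left
      by_cases hj0 : j = 0
      · subst hj0
        by_cases hwr : w < r
        · exfalso
          rcases hR with h | h
          · omega
          · exact h (by rw [pvGetL r c d 0 (by omega), show (0:Nat) + w = w from by omega, pvGetL r c d w hwr])
        · by_cases hwr2 : r < w
          · exfalso
            have hdlen : 1 ≤ d.length := by omega
            obtain ⟨e, d', rfl⟩ : ∃ e d', d = e :: d' := by
              cases d with
              | nil => simp at hdlen
              | cons e d' => exact ⟨e, d', rfl⟩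
            have hc0 : (((List.replicate r c ++ (e :: d')).drop 0).take w)[0]? = some c := by
              rw [pvWin0 _ 0 w hw, pvGetL r c _ 0 (by omega)]
            have he : (((List.replicate r c ++ (e :: d')).drop 0).take w)[r]? = some e := by
              rw [List.getElem?_take, if_pos hwr2, List.getElem?_drop,
                show 0 + r = r + 0 from by omega, pvGetR]
              simp
            rw [pvAllRep_iff] at hrep
            have h1 := hrep c (List.mem_of_getElem? hc0)
            have h2 := hrep e (List.mem_of_getElem? he)
            rw [h1] at h2
            simp_all
          · omega
      · exfalso
        rcases hL with h | h
        · exact hj0 h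
        · exact h (by rw [pvGetL r c d j (by omega), pvGetL r c d (j-1) (by omega)])
  · rintro (hrw | ⟨j, hj, ⟨hrep, hL⟩, hR⟩)
    · refine ⟨0, by omega, ⟨?_, Or.inl rfl⟩, ?_⟩
      · rw [List.drop_zero, List.take_append_of_le_length (by simp; omega), List.take_replicate,
          show min w r = w from by omega]
        exact pvAllRep_replicate w c
      · cases d with
        | nil => exact Or.inl (by simp; omega)
        | cons e d' =>
          refine Or.inr ?_
          intro heq
          rw [pvGetL r c _ 0 (by omega), show (0:Nat) + w = r + 0 from by omega, pvGetR] at heq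
          simp at heq
          exact hd (by simp [heq])
    · have hdw : w ≤ d.length := by omega
      have hdlen : 1 ≤ d.length := by omega
      refine ⟨r + j, by omega, ⟨?_, ?_⟩, ?_⟩
      · rwa [pvDropAppend r (r + j) c d (by omega), show r + j - r = j from by omega]
      · by_cases hj0 : j = 0
        · subst hj0
          refine Or.inr ?_
          intro heq
          obtain ⟨e, d', rfl⟩ : ∃ e d', d = e :: d' := by
            cases d with
            | nil => simp at hdlen
            | cons e d' => exact ⟨e, d', rfl⟩
          rw [show r + 0 = r + 0 from rfl, pvGetR, show r + 0 - 1 = r - 1 from by omega,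
            pvGetL r c _ (r-1) (by omega)] at heq
          simp at heq
          exact hd (by simp [heq])
        · rcases hL with h | h
          · omega
          · refine Or.inr ?_
            intro heq
            apply h
            rw [pvGetR] at heq
            rw [show r + j - 1 = r + (j - 1) from by omega, pvGetR] at heq
            exact heq
      · rcases hR with h | h
        · exact Or.inl (by omega)
        · refine Or.inr ?_
          intro heq
          apply h
          rw [pvGetR, show r + j + w = r + (j + w) from by omega, pvGetR] at heq
          exact heq

theorem pvRuns_decomp (c : Char) (rest : List Char) :
    pvRuns (c :: rest) = (c, (rest.takeWhile (· == c)).length + 1) :: pvRuns (rest.dropWhile (· == c)) := by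
  induction rest generalizing c with
  | nil => simp [pvRuns, pvAddRun]
  | cons x rs ih =>
    by_cases hx : x = c
    · subst hx
      show pvAddRun x 1 (pvRuns (x :: rs)) = _
      rw [ih x]
      simp only [pvAddRun, if_pos rfl, List.takeWhile_cons, List.dropWhile_cons, beq_self_eq_true,
        if_pos rfl, List.length_cons]
      simp [Nat.add_comm]
    · have hcx : ¬ c = x := fun h => hx h.symm
      show pvAddRun c 1 (pvRuns (x :: rs)) = _
      rw [ih x]
      simp only [pvAddRun, if_neg hcx, List.takeWhile_cons, List.dropWhile_cons,
        show (x == c) = false by simp [hx], Bool.false_eq_true, if_false, List.length_nil]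
      rw [ih x]

theorem pvRun_decomp_list (c : Char) (rest : List Char) :
    c :: rest = List.replicate ((rest.takeWhile (· == c)).length + 1) c ++ rest.dropWhile (· == c) := by
  have ht : rest.takeWhile (· == c) = List.replicate (rest.takeWhile (· == c)).length c := by
    apply List.eq_replicate_of_mem
    intro x hx
    simpa using List.mem_takeWhile_imp hx
  calc c :: rest = c :: (rest.takeWhile (· == c) ++ rest.dropWhile (· == c)) := by
        rw [List.takeWhile_append_dropWhile]
    _ = _ := by rw [List.replicate_succ, List.cons_append, ← ht]

theorem pvRuns_mid_gen (w : Nat) (strict : Bool) (Mid : List Char → Bool)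
    (hnil : Mid [] = false)
    (hcore : ∀ c d r, 1 ≤ r → d.head? ≠ some c →
      Mid (List.replicate r c ++ d) = (pvTest w strict r || Mid d)) :
    ∀ (n : Nat) (l : List Char), l.length ≤ n → pvAnyRun w strict (pvRuns l) = Mid l := by
  intro n
  induction n with
  | zero =>
    intro l hl
    have : l = [] := List.eq_nil_of_length_eq_zero (by omega)
    subst this
    simp [pvAnyRun, pvRuns, hnil]
  | succ n ih =>
    intro l hl
    cases l with
    | nil => simp [pvAnyRun, pvRuns, hnil]
    | cons c rest =>
      rw [pvRuns_decomp]
      have hdrop : (rest.dropWhile (· == c)).length ≤ n := by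
        have := List.length_dropWhile_le (· == c) rest
        simp at hl
        omega
      have hdhead : (rest.dropWhile (· == c)).head? ≠ some c := by
        intro h
        have hnot := List.head?_dropWhile_not (· == c) rest
        rw [h] at hnot
        simp at hnot
      have hih := ih (rest.dropWhile (· == c)) hdrop
      calc pvAnyRun w strict ((c, (rest.takeWhile (· == c)).length + 1) :: pvRuns (rest.dropWhile (· == c)))
          = (pvTest w strict ((rest.takeWhile (· == c)).length + 1)
              || pvAnyRun w strict (pvRuns (rest.dropWhile (· == c)))) := by
            simp [pvAnyRun]
        _ = (pvTest w strict ((rest.takeWhile (· == c)).length + 1) || Mid (rest.dropWhile (· == c))) := by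
            rw [hih]
        _ = Mid (List.replicate ((rest.takeWhile (· == c)).length + 1) c ++ rest.dropWhile (· == c)) := by
            rw [hcore c _ _ (by omega) hdhead]
        _ = Mid (c :: rest) := by rw [← pvRun_decomp_list]

theorem pvRuns_non (l : List Char) (w : Nat) (hw : 1 ≤ w) :
    pvAnyRun w false (pvRuns l) = pvMidNon l w := by
  refine pvRuns_mid_gen w false (fun l => pvMidNon l w) ?_ ?_ l.length l le_rfl
  · simp [pvMidNon, show 0 + 1 - w = 0 from by omega]
  · intro c d r hr hd
    show pvMidNon (List.replicate r c ++ d) w = _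
    rw [core_non c d r w hr hw hd]
    simp [pvTest]

theorem pvRuns_strict (l : List Char) (w : Nat) (hw : 1 ≤ w) :
    pvAnyRun w true (pvRuns l) = pvMidStrict l w := by
  refine pvRuns_mid_gen w true (fun l => pvMidStrict l w) ?_ ?_ l.length l le_rfl
  · simp [pvMidStrict, show 0 + 1 - w = 0 from by omega]
  · intro c d r hr hd
    show pvMidStrict (List.replicate r c ++ d) w = _
    rw [core_strict c d r w hr hw hd]
    have hbeq : (r == w) = decide (r = w) := by by_cases h : r = w <;> simp [h]
    simp [pvTest, hbeq]

theorem pvGet0 (u : List Char) : PySem.List.pyGet? u 0 = u[0]? := by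
  cases u <;> simp [PySem.List.pyGet?, PySem.List.pyIdx?]

theorem pvGetNeg1 (u : List Char) (h : u ≠ []) :
    PySem.List.pyGet? u (-1) = u[u.length - 1]? := by
  simp only [PySem.List.pyGet?, PySem.List.pyIdx?]
  have h1 : 1 ≤ u.length := by cases u <;> simp_all
  rw [if_neg (by norm_num), if_pos (show -(u.length:Int) ≤ -1 by omega)]
  norm_num

theorem pvWindows_eq (l : List Char) (w : Nat) (hw : 1 ≤ w) :
    pvWindows l (w : Int) = (List.range (l.length + 1 - w)).map (fun j => (l.drop j).take w) := by
  unfold pvWindows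
  rw [PySem.List.pyRange_one]
  rw [show ((l.length : Int) - ((w : Int) - 1) - 0).toNat = l.length + 1 - w from by omega]
  rw [List.map_map]
  apply List.map_congr_left
  intro j _
  show PySem.List.slice l (some ((0:Int) + (j:Int))) (some ((0:Int) + (j:Int) + (w:Int))) = _
  rw [zero_add, PySem.List.slice_natCast_add]

theorem pvA_non (l : List Char) (w : Nat) (hw : 1 ≤ w) :
    (pvWindows l (w : Int)).any (fun number => pvAllRep number) = pvMidNon l w := by
  rw [pvWindows_eq l w hw]
  rw [List.any_map]
  rfl

def pvStrictBody (wins : List (List Char)) (index : Int) : Bool :=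
  pvAllRep ((PySem.List.pyGet? wins index).getD []) &&
    !((decide (0 < index) &&
        (PySem.List.pyGet? ((PySem.List.pyGet? wins index).getD []) 0 ==
          PySem.List.pyGet? ((PySem.List.pyGet? wins (index - 1)).getD []) 0)) ||
      (decide (index < (wins.length : Int) - 1) &&
        (PySem.List.pyGet? ((PySem.List.pyGet? wins index).getD []) 0 ==
          PySem.List.pyGet? ((PySem.List.pyGet? wins (index + 1)).getD []) (-1))))

theorem pvStrictLoop_any (wins : List (List Char)) (idxs : List Int) :
    pvStrictLoop wins idxs = idxs.any (fun index => pvStrictBody wins index) := by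
  induction idxs with
  | nil => simp [pvStrictLoop]
  | cons i rest ih =>
    rw [pvStrictLoop, List.any_cons, ← ih]
    simp only [pvStrictBody]
    by_cases hA : pvAllRep ((PySem.List.pyGet? wins i).getD []) = true <;>
      by_cases h1 : (0:Int) < i <;>
        by_cases h2 : i < (wins.length:Int) - 1 <;>
          by_cases he1 : (PySem.List.pyGet? ((PySem.List.pyGet? wins i).getD []) 0 ==
              PySem.List.pyGet? ((PySem.List.pyGet? wins (i - 1)).getD []) 0) = true <;>
            by_cases he2 : (PySem.List.pyGet? ((PySem.List.pyGet? wins i).getD []) 0 ==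
                PySem.List.pyGet? ((PySem.List.pyGet? wins (i + 1)).getD []) (-1)) = true <;>
              simp [hA, h1, h2, he1, he2]

theorem pvBody_eq (l : List Char) (w : Nat) (hw : 1 ≤ w) (j : Nat) (hj : j < l.length + 1 - w) :
    pvStrictBody ((List.range (l.length + 1 - w)).map (fun k => (l.drop k).take w)) (j:Int) =
      (pvAllRep ((l.drop j).take w) &&
       (decide (j = 0) || !(l[j]? == l[j-1]?)) &&
       (decide (j = l.length - w) || !(l[j]? == l[j+w]?))) := by
  have hwle : w ≤ l.length := by omega
  have hget : ∀ k : Nat, k < l.length + 1 - w →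
      PySem.List.pyGet? ((List.range (l.length + 1 - w)).map (fun k => (l.drop k).take w)) (k:Int)
        = some ((l.drop k).take w) := by
    intro k hk
    rw [PySem.List.pyGet?_natCast]
    simp [hk]
  unfold pvStrictBody
  rw [hget j hj]
  simp only [Option.getD_some, List.length_map, List.length_range]
  rw [pvGet0, pvWin0 l j w hw]
  have hc1 : decide ((0:Int) < (j:Int)) = !decide (j = 0) := by
    by_cases h : j = 0
    · subst h; simp
    · rw [decide_eq_false h, Bool.not_false]
      apply decide_eq_true
      omega
  have hc2 : decide ((j:Int) < ((l.length + 1 - w : Nat) : Int) - 1) = !decide (j = l.length - w) := by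
    by_cases h : j = l.length - w
    · rw [decide_eq_true h, Bool.not_true]
      apply decide_eq_false
      omega
    · rw [decide_eq_false h, Bool.not_false]
      apply decide_eq_true
      omega
  rw [hc1, hc2]
  by_cases hlast : j = l.length - w
  · -- last window: the right-neighbour test is switched off
    rw [decide_eq_true hlast]
    by_cases hj0 : j = 0
    · rw [decide_eq_true hj0]; simp
    · -- left neighbour exists
      have hprev : ((j:Int) - 1) = (((j - 1 : Nat)) : Int) := by omega
      rw [hprev, hget (j-1) (by omega)]
      simp only [Option.getD_some]
      rw [pvGet0, pvWin0 l (j-1) w hw]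
      rw [decide_eq_false hj0]
      simp
  · rw [decide_eq_false hlast]
    -- right neighbour exists: full window of length w
    have hnextlen : ((l.drop (j+1)).take w).length = w := by
      simp only [List.length_take, List.length_drop]
      omega
    have hnext : ((j:Int) + 1) = (((j + 1 : Nat)) : Int) := by omega
    rw [hnext, hget (j+1) (by omega)]
    simp only [Option.getD_some]
    rw [pvGetNeg1 _ (by intro h; rw [h] at hnextlen; simp at hnextlen; omega), hnextlen]
    rw [List.getElem?_take, if_pos (show w - 1 < w by omega), List.getElem?_drop,
      show j + 1 + (w - 1) = j + w from by omega]
    by_cases hj0 : j = 0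
    · rw [decide_eq_true hj0]; simp
    · have hprev : ((j:Int) - 1) = (((j - 1 : Nat)) : Int) := by omega
      rw [hprev, hget (j-1) (by omega)]
      simp only [Option.getD_some]
      rw [pvGet0, pvWin0 l (j-1) w hw]
      rw [decide_eq_false hj0]
      cases (l[j]? == l[j-1]?) <;> cases (l[j]? == l[j+w]?) <;> simp

theorem pvA_strict (l : List Char) (w : Nat) (hw : 1 ≤ w) :
    pvStrictLoop (pvWindows l (w : Int)) (PySem.List.pyRange 0 ((pvWindows l (w : Int)).length : Int) 1)
      = pvMidStrict l w := by
  rw [pvStrictLoop_any, pvWindows_eq l w hw]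
  rw [show (((List.range (l.length + 1 - w)).map (fun j => (l.drop j).take w)).length : Int)
      = ((l.length + 1 - w : Nat) : Int) from by simp]
  rw [PySem.List.pyRange_one]
  rw [show (((l.length + 1 - w : Nat) : Int) - 0).toNat = l.length + 1 - w from by omega]
  rw [List.any_map]
  rw [Bool.eq_iff_iff]
  simp only [pvMidStrict, List.any_eq_true, List.mem_range, Function.comp_apply, zero_add]
  constructor
  · rintro ⟨j, hj, hb⟩
    exact ⟨j, hj, by rw [pvBody_eq l w hw j hj] at hb; simpa using hb⟩
  · rintro ⟨j, hj, hb⟩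
    exact ⟨j, hj, by rw [pvBody_eq l w hw j hj]; simpa using hb⟩

-- with window_size ≤ 0 every index up to len(s) yields a window, and the one at len(s) is an
-- empty slice, so non-strict A is True on any non-empty input
theorem pvA_trivial (l : List Char) (ws : Int) (hws : ws ≤ 0) (hl : l ≠ []) :
    (pvWindows l ws).any (fun number => pvAllRep number) = true := by
  have hn : 1 ≤ l.length := by cases l <;> simp_all
  rw [List.any_eq_true]
  refine ⟨PySem.List.slice l (some (l.length : Int)) (some ((l.length : Int) + ws)), ?_, ?_⟩
  · exact List.mem_map_of_mem (PySem.List.mem_pyRange_one.mpr (by constructor <;> omega))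
  · have hlen := PySem.List.length_slice l (l.length : Int) ((l.length : Int) + ws)
    have hc1 : PySem.List.clampIdx l.length ((l.length : Int)) = l.length := by
      rw [PySem.List.clampIdx_natCast]; omega
    have hc2 := PySem.List.clampIdx_le l.length ((l.length : Int) + ws)
    have : PySem.List.slice l (some (l.length : Int)) (some ((l.length : Int) + ws)) = [] := by
      apply List.eq_nil_of_length_eq_zero
      omega
    rw [this]
    rfl

-- non-strict B with window_size ≤ 0: the first completed run already passes run ≥ window_size
theorem pvB_trivial_aux (ws : Int) (hws : ws ≤ 0) :
    ∀ (l : List Char) (k : Int) (prev : Option Char), 0 < k →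
      pvRunLoop ws false k prev l = true := by
  intro l
  induction l with
  | nil =>
    intro k prev hk
    rw [pvRunLoop]
    simp [decide_eq_true hk, decide_eq_true (show ws ≤ k by omega)]
  | cons ch rest ih =>
    intro k prev hk
    rw [pvRunLoop]
    by_cases h : (decide (0 < k) && (some ch == prev)) = true
    · rw [if_pos h]
      exact ih (k + 1) prev (by omega)
    · rw [if_neg h, if_pos]
      simp [decide_eq_true hk, decide_eq_true (show ws ≤ k by omega)]

theorem pvB_trivial (l : List Char) (ws : Int) (hws : ws ≤ 0) (hl : l ≠ []) :
    pvRunLoop ws false 0 none l = true := by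
  cases l with
  | nil => simp_all
  | cons c rest =>
    rw [pvRunLoop]
    norm_num
    exact pvB_trivial_aux ws hws rest 1 (some c) (by omega)

-- ===== VERDICT (by name: the statement is the Claim_ definition above) =====
theorem exists_window_of_repeated_digits_spec : Claim_equal_exists_window_of_repeated_digits := by
  intro s ws strict _ hpre
  unfold Pre_exists_window_of_repeated_digits at hpre
  unfold Spec_exists_window_of_repeated_digits
  by_cases hws : 1 ≤ ws
  · obtain ⟨w, rfl⟩ : ∃ w : Nat, ws = (w : Int) := ⟨ws.toNat, (Int.toNat_of_nonneg (by omega)).symm⟩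
    have hw : 1 ≤ w := by exact_mod_cast hws
    unfold exists_window_of_repeated_digits exists_window_of_repeated_digits_alt
    rw [pvB_runs s.toList w strict]
    cases strict with
    | false => simpa using (pvA_non s.toList w hw).trans (pvRuns_non s.toList w hw).symm
    | true => simpa using (pvA_strict s.toList w hw).trans (pvRuns_strict s.toList w hw).symm
  · obtain ⟨hs, hne⟩ := hpre.resolve_left hws
    subst hs
    have hl : s.toList ≠ [] := by simpa using hne
    unfold exists_window_of_repeated_digits exists_window_of_repeated_digits_alt
    simp only [Bool.not_false, if_true]
    rw [pvA_trivial s.toList ws (by omega) hl, pvB_trivial s.toList ws (by omega) hl]
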